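-- pv_equiv track=rewrite | github.com/Hkau/kth | grupdat09/ovning4/ovn.py | from_rovarspraket
-- ===== SOURCE A (Python) =====
-- konsonanter = "bcdfghjklmnpqrstvwxz"
--
-- def from_rovarspraket(text):
-- 	utrad = ""
--
-- 	i = 0
-- 	while i < len(text):
-- 		utrad += text[i]
-- 		if text[i].lower() in konsonanter:
-- 			i+= 3
-- 		else:
-- 			i+= 1
-- 	return utrad
-- ===== SOURCE B (Python) =====
-- konsonanter = "bcdfghjklmnpqrstvwxz"
--
-- def from_rovarspraket(text):
--     # Run-based decoder: one outer iteration per consonant; the whole vowel run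
--     # before it (plus the consonant) is copied in bulk as a slice, then two
--     # characters are skipped blindly.
--     pieces = []
--     pos = 0
--     n = len(text)
--     while pos < n:
--         j = pos
--         while j < n and text[j].lower() not in konsonanter:
--             j += 1
--         if j == n:
--             pieces.append(text[pos:])
--             break
--         pieces.append(text[pos:j + 1])
--         pos = j + 3
--     return "".join(pieces)
-- ===== Notes on version B (the rewrite author's own statement) =====
-- stated objective: faster
-- what changed: Replaces A's per-character while loop (one iteration and one string concatenation per output character, index jumping +3 on consonants) with a run-based decoder: an inner scan finds the next consonant, the whole vowel run plus that consonant is emitted in bulk as one slice, and the pieces are joined once.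
import Mathlib
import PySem

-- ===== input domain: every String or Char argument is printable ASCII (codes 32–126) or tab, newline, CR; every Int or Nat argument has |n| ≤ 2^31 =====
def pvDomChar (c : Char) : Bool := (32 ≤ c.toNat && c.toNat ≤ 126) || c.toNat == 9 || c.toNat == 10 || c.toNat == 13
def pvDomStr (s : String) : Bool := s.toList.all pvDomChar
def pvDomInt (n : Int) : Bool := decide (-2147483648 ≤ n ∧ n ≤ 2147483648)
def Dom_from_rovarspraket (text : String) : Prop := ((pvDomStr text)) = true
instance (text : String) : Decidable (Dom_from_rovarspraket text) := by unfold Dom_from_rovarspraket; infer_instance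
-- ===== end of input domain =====

-- B replaces A's per-character while loop (index jump +3, string concatenation per char)
-- with a run-based decoder: scan to the next consonant, emit the run plus the consonant as
-- one slice, join the pieces once (objective: faster, measured).


-- ===== PORT A =====
-- c.lower() in konsonanter; Char.toLower is exact on the ASCII domain
def pvIsKons (c : Char) : Bool := "bcdfghjklmnpqrstvwxz".toList.contains c.toLower

-- the while loop of A: index i over the characters, accumulator utrad
def pvLoopA (cs : List Char) (i : Nat) (utrad : List Char) : List Char :=
  if h : i < cs.length then
    let c := cs[i]
    let u := utrad ++ [c]
    if pvIsKons c then pvLoopA cs (i + 3) u else pvLoopA cs (i + 1) u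
  else utrad
termination_by cs.length - i

def from_rovarspraket (text : String) : String := String.ofList (pvLoopA text.toList 0 [])

-- ===== PORT B =====
-- the inner scan of B: first index ≥ j holding a consonant, or the length
def pvScan (cs : List Char) (j : Nat) : Nat :=
  if h : j < cs.length then
    if pvIsKons cs[j] then j else pvScan cs (j + 1)
  else j
termination_by cs.length - j

-- the scan never moves backwards (needed for pvLoopB's termination)
theorem pvScan_ge (cs : List Char) (j : Nat) : j ≤ pvScan cs j := by
  rw [pvScan]
  split
  · split
    · exact le_refl j
    · have := pvScan_ge cs (j + 1); omega
  · exact le_refl j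
termination_by cs.length - j
decreasing_by omega

-- the outer while loop of B: one iteration per consonant, emitting slices
def pvLoopB (cs : List Char) (pos : Nat) : List Char :=
  if hp : pos < cs.length then
    let j := pvScan cs pos
    if j = cs.length then cs.drop pos
    else ((cs.drop pos).take (j + 1 - pos)) ++ pvLoopB cs (j + 3)
  else []
termination_by cs.length - pos
decreasing_by have := pvScan_ge cs pos; omega

def from_rovarspraket_alt (text : String) : String := String.ofList (pvLoopB text.toList 0)

-- ===== PRECONDITION & SPEC =====
def Spec_from_rovarspraket (text : String) (out : String) : Prop := out = from_rovarspraket_alt text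
instance (text : String) (out : String) : Decidable (Spec_from_rovarspraket text out) := by unfold Spec_from_rovarspraket; infer_instance

-- ===== CLAIM (what is proved, stated in full; the proofs are below) =====
def Claim_equal_from_rovarspraket : Prop := ∀ (text : String), Dom_from_rovarspraket text → Spec_from_rovarspraket text (from_rovarspraket text)

-- ===== LEMMAS AND PROOFS =====

theorem pvScan_le (cs : List Char) (j : Nat) : pvScan cs j ≤ max j cs.length := by
  rw [pvScan]
  split
  · split
    · omega
    · have := pvScan_le cs (j + 1); omega
  · omega
termination_by cs.length - j
decreasing_by omega

-- at a consonant the scan stops immediately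
theorem pvScan_stop (cs : List Char) (j : Nat) (h : j < cs.length) (hc : pvIsKons cs[j]) :
    pvScan cs j = j := by rw [pvScan]; simp [h, hc]

-- at a non-consonant the scan advances
theorem pvScan_step (cs : List Char) (j : Nat) (h : j < cs.length) (hc : ¬ pvIsKons cs[j]) :
    pvScan cs j = pvScan cs (j + 1) := by rw [pvScan]; simp [h, hc]

-- the three unfoldings of B's outer loop
theorem pvLoopB_stop (cs : List Char) (pos : Nat) (h : ¬ pos < cs.length) :
    pvLoopB cs pos = [] := by rw [pvLoopB]; simp [h]

theorem pvLoopB_tail (cs : List Char) (pos : Nat) (h : pos < cs.length)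
    (he : pvScan cs pos = cs.length) : pvLoopB cs pos = cs.drop pos := by
  rw [pvLoopB]; simp [h, he]

theorem pvLoopB_piece (cs : List Char) (pos : Nat) (h : pos < cs.length)
    (he : ¬ pvScan cs pos = cs.length) :
    pvLoopB cs pos
      = ((cs.drop pos).take (pvScan cs pos + 1 - pos)) ++ pvLoopB cs (pvScan cs pos + 3) := by
  rw [pvLoopB]; simp [h, he]

-- B's loop at a non-consonant still emits exactly that character first
theorem pvLoopB_vowel (cs : List Char) (i : Nat) (h : i < cs.length) (hc : ¬ pvIsKons cs[i]) :
    pvLoopB cs i = cs[i] :: pvLoopB cs (i + 1) := by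
  have hdrop : cs.drop i = cs[i] :: cs.drop (i + 1) := List.drop_eq_getElem_cons h
  have hstep := pvScan_step cs i h hc
  by_cases hend : pvScan cs (i + 1) = cs.length
  · -- the rest holds no consonant: both sides are raw suffixes
    rw [pvLoopB_tail cs i h (by omega), hdrop]
    by_cases h1 : i + 1 < cs.length
    · rw [pvLoopB_tail cs (i + 1) h1 hend]
    · rw [pvLoopB_stop cs (i + 1) h1, List.drop_eq_nil_of_le (by omega)]
  · -- a consonant at the scan result: the emitted slice loses its head character
    have hge : i + 1 ≤ pvScan cs (i + 1) := pvScan_ge cs (i + 1)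
    have h1 : i + 1 < cs.length := by
      by_contra hn
      have := pvScan_le cs (i + 1)
      omega
    rw [pvLoopB_piece cs i h (by omega), pvLoopB_piece cs (i + 1) h1 hend, hstep, hdrop]
    have h2 : pvScan cs (i + 1) + 1 - i = (pvScan cs (i + 1) + 1 - (i + 1)) + 1 := by omega
    rw [h2, List.take_succ_cons, List.cons_append]

-- A's loop from index i equals B's loop from index i, prefixed by the accumulator
theorem pvLoopA_eq (k : Nat) : ∀ (cs : List Char) (i : Nat) (u : List Char),
    cs.length - i ≤ k → pvLoopA cs i u = u ++ pvLoopB cs i := by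
  induction k with
  | zero =>
    intro cs i u hk
    have hge : ¬ i < cs.length := by omega
    rw [pvLoopA, pvLoopB_stop cs i hge]
    simp [hge]
  | succ k ih =>
    intro cs i u hk
    rw [pvLoopA]
    by_cases h : i < cs.length
    · simp only [h, dif_pos]
      by_cases hc : pvIsKons cs[i]
      · -- consonant: B's scan stops at i, the slice is the single character, jump +3
        simp only [hc, if_pos]
        rw [ih cs (i + 3) (u ++ [cs[i]]) (by omega)]
        have hstop := pvScan_stop cs i h hc
        rw [pvLoopB_piece cs i h (by omega), hstop]
        have hdrop : cs.drop i = cs[i] :: cs.drop (i + 1) := List.drop_eq_getElem_cons h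
        have h1 : i + 1 - i = 1 := by omega
        rw [h1, hdrop, List.take_succ_cons, List.take_zero, List.append_assoc, List.singleton_append]
      · simp only [hc, if_neg, Bool.not_eq_true]
        rw [ih cs (i + 1) (u ++ [cs[i]]) (by omega),
            pvLoopB_vowel cs i h (by simp [hc]), List.append_assoc]
        rfl
    · rw [pvLoopB_stop cs i h]
      simp [h]

-- ===== VERDICT (by name: the statement is the Claim_ definition above) =====
theorem from_rovarspraket_spec : Claim_equal_from_rovarspraket := by
  intro text _
  unfold Spec_from_rovarspraket from_rovarspraket from_rovarspraket_alt
  rw [pvLoopA_eq text.toList.length text.toList 0 [] (by omega)]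
  simp
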